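-- pv_equiv track=rewrite | github.com/leeyejin1231/PCCP | 14_PCCP 모의고사/05.py | solution
-- ===== SOURCE A (Python) =====
-- from itertools import permutations
--
-- def solution(ability):
--     answer = 0
--     n, m = len(ability), len(ability[0])
--     combi = list(permutations([i for i in range(n)], m))
--
--     for students in combi:
--         stats = 0
--         for i, student in enumerate(students):
--             stats += ability[student][i]
--         answer = max(answer, stats)
--
--     return answer
-- ===== SOURCE B (Python) =====
-- def solution(ability):
--     m = len(ability[0])
--
--     def go(i, pool):
--         # best total for columns i..m-1 using distinct students from pool; None if impossible
--         if i == m: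
--             return 0
--         best = None
--         for k in range(len(pool)):
--             sub = go(i + 1, pool[:k] + pool[k + 1:])
--             if sub is not None:
--                 v = ability[pool[k]][i] + sub
--                 if best is None or v > best:
--                     best = v
--         return best
--
--     r = go(0, list(range(len(ability))))
--     return max(0, r) if r is not None else 0
-- ===== Notes on version B (the rewrite author's own statement) =====
-- stated objective: alternative
-- what changed: B replaces A's materialization of the full list of permutations plus per-permutation re-summing with a direct recursive backtracking maximization over columns that shares common prefixes and never builds the permutation list.
import Mathlib
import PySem

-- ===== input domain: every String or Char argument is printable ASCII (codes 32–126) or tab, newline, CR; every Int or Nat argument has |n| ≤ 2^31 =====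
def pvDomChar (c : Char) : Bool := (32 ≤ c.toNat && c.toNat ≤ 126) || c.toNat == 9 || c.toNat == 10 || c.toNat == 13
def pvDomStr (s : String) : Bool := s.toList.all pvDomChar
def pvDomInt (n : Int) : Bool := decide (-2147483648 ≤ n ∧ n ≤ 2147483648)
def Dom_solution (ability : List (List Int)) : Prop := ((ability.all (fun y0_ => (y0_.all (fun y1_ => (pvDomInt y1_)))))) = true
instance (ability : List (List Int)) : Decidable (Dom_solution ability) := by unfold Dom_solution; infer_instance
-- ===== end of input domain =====

-- B replaces A's materialized permutation list with a direct recursive backtracking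
-- maximization (objective: alternative/simpler traversal; same return value).

-- ===== PORT A =====
-- hand port of itertools.permutations(pool, r) (list of index-order r-permutations);
-- exact for distinct pools in lexicographic index order, as itertools produces.
def pvPerms : Nat → List Nat → List (List Nat)
  | 0, _ => [[]]
  | r+1, pool =>
      (List.range pool.length).flatMap (fun k =>
        (pvPerms r (pool.eraseIdx k)).map (fun t => pool.getD k 0 :: t))

-- list indexing ability[student][i] is in range under Pre_solution; getD is exact there
def solution (ability : List (List Int)) : Int :=
  let n := ability.length
  let m := (ability.getD 0 []).length
  let combi := pvPerms m (List.range n)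
  combi.foldl (fun answer students =>
    max answer ((students.zipIdx.foldl
      (fun stats p => stats + ((ability.getD p.1 []).getD p.2 0)) 0))) 0

-- ===== PORT B =====
-- port of Source B's `go`: best total for columns i..m-1 using distinct students from pool
-- (none plays the role of Python's None)
def pvGo (ability : List (List Int)) (m : Nat) (i : Nat) (pool : List Nat) : Option Int :=
  if i = m then some 0
  else
    (List.range pool.length).attach.foldl (fun best k =>
      match pvGo ability m (i+1) (pool.eraseIdx k.1) with
      | none => best
      | some sub =>
        let v := (ability.getD (pool.getD k.1 0) []).getD i 0 + sub
        match best with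
        | none => some v
        | some b => if v > b then some v else some b) none
termination_by pool.length
decreasing_by
  have hk := List.mem_range.mp k.2
  simp [List.length_eraseIdx, hk]
  omega

def solution_alt (ability : List (List Int)) : Int :=
  let m := (ability.getD 0 []).length
  match pvGo ability m 0 (List.range ability.length) with
  | none => 0
  | some r => max 0 r

-- ===== PRECONDITION & SPEC =====
-- exactly the inputs where Python A returns: ability nonempty (else ability[0] raises),
-- and when m ≤ n (some permutation exists and every row gets indexed at columns < m)
-- every row must have length ≥ m (else IndexError); B raises on exactly the same inputs.
def Pre_solution (ability : List (List Int)) : Prop :=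
  ability ≠ [] ∧
  ((ability.headD []).length ≤ ability.length →
    ∀ row ∈ ability, (ability.headD []).length ≤ row.length)
instance (ability : List (List Int)) : Decidable (Pre_solution ability) := by
  unfold Pre_solution; infer_instance
def pvWitness_solution : List (List Int) := [[5, 0], [0, 7], [4, 4]]
def Spec_solution (ability : List (List Int)) (out : Int) : Prop := out = solution_alt ability
instance (ability : List (List Int)) (out : Int) : Decidable (Spec_solution ability out) := by unfold Spec_solution; infer_instance

-- ===== CLAIM (what is proved, stated in full; the proofs are below) =====
def Claim_equal_solution : Prop := ∀ (ability : List (List Int)), Dom_solution ability → Pre_solution ability → Spec_solution ability (solution ability)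

-- ===== LEMMAS AND PROOFS =====

def pvOptMax (acc : Int) : Option Int → Int
  | none => acc
  | some v => max acc v

theorem pvFoldl_add_shift (g : Nat × Nat → Int) :
    ∀ (l : List (Nat × Nat)) (a : Int),
      l.foldl (fun s p => s + g p) a = a + l.foldl (fun s p => s + g p) 0 := by
  intro l
  induction l with
  | nil => intro a; simp
  | cons x t ih =>
      intro a
      simp only [List.foldl_cons]
      rw [ih (a + g x), ih (0 + g x)]
      ring

theorem pvFoldl_flatMap {α β γ : Type} (l : List α) (f : α → List β) (g : γ → β → γ) :
    ∀ (acc : γ), (l.flatMap f).foldl g acc = l.foldl (fun a x => (f x).foldl g a) acc := by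
  induction l with
  | nil => intro acc; simp
  | cons x t ih =>
      intro acc
      simp only [List.flatMap_cons, List.foldl_append, List.foldl_cons]
      exact ih _

theorem pvFold_opt (c : Int) (f : Nat → Int) (h : Nat → Option Int) :
    ∀ (l : List Nat) (acc : Int) (best : Option Int),
      l.foldl (fun a k => pvOptMax a ((h k).map (fun v => c + (f k + v))))
        (pvOptMax acc (best.map (fun v => c + v)))
      = pvOptMax acc ((l.foldl (fun best k =>
          match h k with
          | none => best
          | some sub =>
            let v := f k + sub
            match best with
            | none => some v
            | some b => if v > b then some v else some b) best).map (fun v => c + v)) := by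
  intro l
  induction l with
  | nil => intro acc best; simp
  | cons k t ih =>
      intro acc best
      simp only [List.foldl_cons]
      have hstep :
          pvOptMax (pvOptMax acc (best.map (fun v => c + v))) ((h k).map (fun v => c + (f k + v)))
          = pvOptMax acc (((match h k with
              | none => best
              | some sub =>
                let v := f k + sub
                match best with
                | none => some v
                | some b => if v > b then some v else some b) : Option Int).map (fun v => c + v)) := by
        cases hh : h k with
        | none => simp [pvOptMax]
        | some sub =>
            cases best with
            | none => simp [pvOptMax]
            | some b =>
                simp only [Option.map_some, pvOptMax]
                split_ifs with hv <;> simp only [Option.map_some] <;> omega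
      rw [hstep, ih]

theorem pvMain (ability : List (List Int)) (m : Nat) :
    ∀ (r : Nat) (pool : List Nat) (i : Nat) (acc c : Int), i + r = m →
      (pvPerms r pool).foldl (fun a st =>
          max a (c + (st.zipIdx i).foldl
            (fun stats p => stats + ((ability.getD p.1 []).getD p.2 0)) 0)) acc
      = pvOptMax acc ((pvGo ability m i pool).map (fun v => c + v)) := by
  intro r
  induction r with
  | zero =>
      intro pool i acc c hi
      have him : i = m := by omega
      simp [pvPerms, pvGo, him, pvOptMax]
  | succ r ih =>
      intro pool i acc c hi
      have hne : i ≠ m := by omega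
      rw [pvGo]
      simp only [if_neg hne]
      rw [pvPerms]
      rw [pvFoldl_flatMap]
      have hbody :
          (fun (a : Int) (k : Nat) =>
            ((pvPerms r (pool.eraseIdx k)).map (fun t => pool.getD k 0 :: t)).foldl
              (fun a st => max a (c + (st.zipIdx i).foldl
                (fun stats p => stats + ((ability.getD p.1 []).getD p.2 0)) 0)) a)
          = (fun (a : Int) (k : Nat) =>
              pvOptMax a ((pvGo ability m (i+1) (pool.eraseIdx k)).map
                (fun v => c + ((ability.getD (pool.getD k 0) []).getD i 0 + v)))) := by
        funext a k
        rw [List.foldl_map]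
        have hsc : ∀ t : List Nat,
            ((pool.getD k 0 :: t).zipIdx i).foldl
              (fun stats p => stats + ((ability.getD p.1 []).getD p.2 0)) 0
            = (ability.getD (pool.getD k 0) []).getD i 0
              + (t.zipIdx (i+1)).foldl
                  (fun stats p => stats + ((ability.getD p.1 []).getD p.2 0)) 0 := by
          intro t
          rw [List.zipIdx_cons, List.foldl_cons,
            pvFoldl_add_shift (fun p => (ability.getD p.1 []).getD p.2 0)]
          ring_nf
        have hfun :
            (fun (a : Int) (t : List Nat) => max a (c + ((pool.getD k 0 :: t).zipIdx i).foldl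
              (fun stats p => stats + ((ability.getD p.1 []).getD p.2 0)) 0))
            = (fun (a : Int) (t : List Nat) => max a ((c + (ability.getD (pool.getD k 0) []).getD i 0)
                + (t.zipIdx (i+1)).foldl
                    (fun stats p => stats + ((ability.getD p.1 []).getD p.2 0)) 0)) := by
          funext a t
          rw [hsc t]
          ring_nf
        rw [hfun, ih (pool.eraseIdx k) (i+1) a (c + (ability.getD (pool.getD k 0) []).getD i 0) (by omega)]
        congr 1
        cases pvGo ability m (i+1) (pool.eraseIdx k) <;> simp
        ring
      rw [hbody]
      have := pvFold_opt c
        (fun k => (ability.getD (pool.getD k 0) []).getD i 0)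
        (fun k => pvGo ability m (i+1) (pool.eraseIdx k))
        (List.range pool.length) acc none
      simpa [List.foldl_attach] using this

-- ===== VERDICT (by name: the statement is the Claim_ definition above) =====
theorem solution_spec : Claim_equal_solution := by
  intro ability _ _
  unfold Spec_solution solution solution_alt
  have h := pvMain ability (ability.getD 0 []).length (ability.getD 0 []).length
    (List.range ability.length) 0 0 0 (by omega)
  simp only [zero_add] at h
  rw [h]
  simp only [List.getD_eq_getElem?_getD]
  cases hgo : pvGo ability ((ability[0]?.getD []).length) 0 (List.range ability.length) with
  | none => simp [pvOptMax]
  | some v => simp [pvOptMax]
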